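-- pv_equiv track=rewrite | github.com/pypi-data/pypi-mirror-400 | packages/package-auto-assembler/package_auto_assembler-0.5.29-py3-none-any.whl/package_auto_assembler/.paa.tracking/python_modules/components/paa_deps/local_dependencies_handler.py | _remove_metadata
-- ===== SOURCE A (Python) =====
-- def _remove_metadata(module_content: str) -> str:
--     """
--     Method for removing metadata from the module, including __package_metadata__ and __design_choices__.
--     """
--
--     lines = module_content.split('\n')
--     new_lines = []
--     inside_metadata = False
--
--     for line in lines:
--         if line.strip().startswith("__package_metadata__ = {") or line.strip().startswith("__design_choices__ = {"):
--             inside_metadata = True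
--         elif inside_metadata and '}' in line:
--             inside_metadata = False
--             continue  # Skip adding this line to new_lines
--
--         if not inside_metadata:
--             new_lines.append(line)
--
--     return '\n'.join(new_lines)
-- ===== SOURCE B (Python) =====
-- def _remove_metadata(module_content: str) -> str:
--     """Strip __package_metadata__ / __design_choices__ blocks via an index-based scan."""
--     lines = module_content.split('\n')
--
--     def is_marker(line):
--         s = line.strip()
--         return s.startswith("__package_metadata__ = {") or s.startswith("__design_choices__ = {")
--
--     out = []
--     i, n = 0, len(lines)
--     while i < n:
--         if is_marker(lines[i]):
--             i += 1
--             while i < n and (is_marker(lines[i]) or '}' not in lines[i]):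
--                 i += 1
--             i += 1  # skip the block's closing line (no-op past the end)
--         else:
--             out.append(lines[i])
--             i += 1
--     return '\n'.join(out)
-- ===== Notes on version B (the rewrite author's own statement) =====
-- stated objective: alternative
-- what changed: Replaced the boolean inside_metadata flag threaded through a single for-loop with an explicit index-based scan: an outer while appends ordinary lines, and on a marker line an inner while advances the index past the block up to and including its closing '}' line.
import Mathlib
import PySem

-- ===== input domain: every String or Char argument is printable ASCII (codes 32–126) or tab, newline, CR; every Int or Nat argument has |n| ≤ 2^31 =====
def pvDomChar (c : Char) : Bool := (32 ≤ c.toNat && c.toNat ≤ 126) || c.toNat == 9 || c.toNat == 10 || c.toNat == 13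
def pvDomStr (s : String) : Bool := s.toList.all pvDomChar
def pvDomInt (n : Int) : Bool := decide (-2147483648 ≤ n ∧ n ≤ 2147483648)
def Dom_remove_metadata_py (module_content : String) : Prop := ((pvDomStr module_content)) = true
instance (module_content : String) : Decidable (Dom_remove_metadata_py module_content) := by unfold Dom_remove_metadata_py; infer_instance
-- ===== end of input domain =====

-- B is an alternative decomposition: an index-based scan with an inner skip loop instead of A's boolean-flag state machine; same cost.

-- ===== PORT A =====
-- one loop step of A's for-loop: state = (new_lines, inside_metadata)
def pvStepA (st : List String × Bool) (line : String) : List String × Bool :=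
  if PySem.Str.startswith (PySem.Str.strip line) "__package_metadata__ = {"
      || PySem.Str.startswith (PySem.Str.strip line) "__design_choices__ = {" then
    (st.1, true)
  else if st.2 && PySem.Str.isIn "}" line then
    (st.1, false)  -- continue: skip appending this line
  else
    (if st.2 then st.1 else st.1 ++ [line], st.2)

def remove_metadata_py (module_content : String) : String :=
  -- split('\n'): sep nonempty, so Str.split? always returns some; getD [] is exact
  let lines := (PySem.Str.split? module_content "\n").getD []
  let r := lines.foldl pvStepA ([], false)
  PySem.Str.join "\n" r.1

-- ===== PORT B =====
def pvIsMarker (line : String) : Bool :=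
  PySem.Str.startswith (PySem.Str.strip line) "__package_metadata__ = {"
    || PySem.Str.startswith (PySem.Str.strip line) "__design_choices__ = {"

-- inner while: advance i past block lines, returning the index of the closing line (or lines.length)
def pvSkipBlock (lines : List String) (i : Nat) : Nat :=
  if h : i < lines.length then
    if pvIsMarker lines[i] || !PySem.Str.isIn "}" lines[i] then pvSkipBlock lines (i + 1)
    else i
  else i
termination_by lines.length - i

theorem pvSkipBlock_le (lines : List String) (i : Nat) : i ≤ pvSkipBlock lines i := by
  unfold pvSkipBlock
  split
  · split
    · exact le_trans (Nat.le_succ i) (pvSkipBlock_le lines (i + 1))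
    · exact le_refl i
  · exact le_refl i
termination_by lines.length - i

-- outer while over the index i
def pvBLoop (lines : List String) (i : Nat) (out : List String) : List String :=
  if h : i < lines.length then
    if pvIsMarker lines[i] then
      pvBLoop lines (pvSkipBlock lines (i + 1) + 1) out
    else
      pvBLoop lines (i + 1) (out ++ [lines[i]])
  else out
termination_by lines.length - i
decreasing_by
  · have := pvSkipBlock_le lines (i + 1); omega
  · omega

def remove_metadata_py_alt (module_content : String) : String :=
  let lines := (PySem.Str.split? module_content "\n").getD []
  PySem.Str.join "\n" (pvBLoop lines 0 [])

-- ===== PRECONDITION & SPEC =====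
def Spec_remove_metadata_py (module_content : String) (out : String) : Prop := out = remove_metadata_py_alt module_content
instance (module_content : String) (out : String) : Decidable (Spec_remove_metadata_py module_content out) := by unfold Spec_remove_metadata_py; infer_instance

-- ===== CLAIM (what is proved, stated in full; the proofs are below) =====
def Claim_equal_remove_metadata_py : Prop := ∀ (module_content : String), Dom_remove_metadata_py module_content → Spec_remove_metadata_py module_content (remove_metadata_py module_content)

-- ===== LEMMAS AND PROOFS =====

-- joint invariant: A's fold from (acc, false) over the suffix equals B's outer loop,
-- and A's fold from (acc, true) equals B resuming after the inner skip loop.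
theorem pv_joint (lines : List String) :
    ∀ (n i : Nat) (acc : List String), lines.length - i ≤ n →
      (((lines.drop i).foldl pvStepA (acc, false)).1 = pvBLoop lines i acc ∧
       ((lines.drop i).foldl pvStepA (acc, true)).1 = pvBLoop lines (pvSkipBlock lines i + 1) acc) := by
  intro n
  induction n with
  | zero =>
    intro i acc h
    have hge : lines.length ≤ i := by omega
    have hdrop : lines.drop i = [] := List.drop_eq_nil_of_le hge
    have hB : ∀ j, lines.length ≤ j → pvBLoop lines j acc = acc := by
      intro j hj; unfold pvBLoop; rw [dif_neg (by omega)]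
    have hS : pvSkipBlock lines i = i := by unfold pvSkipBlock; rw [dif_neg (by omega)]
    refine ⟨?_, ?_⟩
    · rw [hdrop]; simpa using (hB i hge).symm
    · rw [hdrop, hS]; simpa using (hB (i + 1) (by omega)).symm
  | succ n ih =>
    intro i acc h
    by_cases hi : i < lines.length
    · have hdrop : lines.drop i = lines[i] :: lines.drop (i + 1) :=
        List.drop_eq_getElem_cons hi
      by_cases hm : pvIsMarker lines[i]
      · -- marker line: A flips to inside, appends nothing; B enters skip mode
        have hstepF : pvStepA (acc, false) lines[i] = (acc, true) := by
          simp only [pvStepA]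
          rw [if_pos (by simpa [pvIsMarker] using hm)]
        have hstepT : pvStepA (acc, true) lines[i] = (acc, true) := by
          simp only [pvStepA]
          rw [if_pos (by simpa [pvIsMarker] using hm)]
        have hBi : pvBLoop lines i acc = pvBLoop lines (pvSkipBlock lines (i + 1) + 1) acc := by
          conv_lhs => unfold pvBLoop
          rw [dif_pos hi, if_pos hm]
        have hSi : pvSkipBlock lines i = pvSkipBlock lines (i + 1) := by
          conv_lhs => unfold pvSkipBlock
          rw [dif_pos hi, if_pos (by simp [hm])]
        obtain ⟨ih1, ih2⟩ := ih (i + 1) acc (by omega)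
        constructor
        · rw [hdrop, List.foldl_cons, hstepF, ih2, hBi]
        · rw [hdrop, List.foldl_cons, hstepT, ih2, hSi]
      · by_cases hc : PySem.Chars.isIn ['}'] lines[i].toList = true
        · -- non-marker closing line: A (inside) skips it and leaves the block; B's inner loop stops here
          have hstepF : pvStepA (acc, false) lines[i] = (acc ++ [lines[i]], false) := by
            simp only [pvStepA]
            rw [if_neg (by simpa [pvIsMarker] using hm)]
            simp
          have hstepT : pvStepA (acc, true) lines[i] = (acc, false) := by
            simp only [pvStepA]
            rw [if_neg (by simpa [pvIsMarker] using hm)]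
            simp [hc]
          have hBi : pvBLoop lines i acc = pvBLoop lines (i + 1) (acc ++ [lines[i]]) := by
            conv_lhs => unfold pvBLoop
            rw [dif_pos hi, if_neg hm]
          have hSi : pvSkipBlock lines i = i := by
            conv_lhs => unfold pvSkipBlock
            rw [dif_pos hi, if_neg (by simp [hm, hc])]
          obtain ⟨ih1, _⟩ := ih (i + 1) acc (by omega)
          obtain ⟨ih1', _⟩ := ih (i + 1) (acc ++ [lines[i]]) (by omega)
          constructor
          · rw [hdrop, List.foldl_cons, hstepF, ih1', hBi]
          · rw [hdrop, List.foldl_cons, hstepT, ih1, hSi]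
        · -- ordinary line: A appends it when outside, skips it when inside; B appends / keeps skipping
          have hstepF : pvStepA (acc, false) lines[i] = (acc ++ [lines[i]], false) := by
            simp only [pvStepA]
            rw [if_neg (by simpa [pvIsMarker] using hm)]
            simp
          have hstepT : pvStepA (acc, true) lines[i] = (acc, true) := by
            simp only [pvStepA]
            rw [if_neg (by simpa [pvIsMarker] using hm)]
            simp [hc]
          have hBi : pvBLoop lines i acc = pvBLoop lines (i + 1) (acc ++ [lines[i]]) := by
            conv_lhs => unfold pvBLoop
            rw [dif_pos hi, if_neg hm]
          have hSi : pvSkipBlock lines i = pvSkipBlock lines (i + 1) := by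
            conv_lhs => unfold pvSkipBlock
            rw [dif_pos hi, if_pos (by simp [hm, hc])]
          obtain ⟨_, ih2⟩ := ih (i + 1) acc (by omega)
          obtain ⟨ih1', _⟩ := ih (i + 1) (acc ++ [lines[i]]) (by omega)
          constructor
          · rw [hdrop, List.foldl_cons, hstepF, ih1', hBi]
          · rw [hdrop, List.foldl_cons, hstepT, ih2, hSi]
    · -- i past the end: same as the base case
      have hge : lines.length ≤ i := by omega
      have hdrop : lines.drop i = [] := List.drop_eq_nil_of_le hge
      have hB : ∀ j, lines.length ≤ j → pvBLoop lines j acc = acc := by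
        intro j hj; unfold pvBLoop; rw [dif_neg (by omega)]
      have hS : pvSkipBlock lines i = i := by unfold pvSkipBlock; rw [dif_neg (by omega)]
      refine ⟨?_, ?_⟩
      · rw [hdrop]; simpa using (hB i hge).symm
      · rw [hdrop, hS]; simpa using (hB (i + 1) (by omega)).symm

-- ===== VERDICT (by name: the statement is the Claim_ definition above) =====
theorem remove_metadata_py_spec : Claim_equal_remove_metadata_py := by
  intro s _
  unfold Spec_remove_metadata_py remove_metadata_py remove_metadata_py_alt
  have := (pv_joint ((PySem.Str.split? s "\n").getD []) ((PySem.Str.split? s "\n").getD []).length 0 [] (by omega)).1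
  simpa using congrArg (PySem.Str.join "\n") this
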